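-- pv_equiv track=rewrite | github.com/konrads/playground | python/algos/dropped_requests_hackerrank.py | droppedRequests__my_solution
-- ===== SOURCE A (Python) =====
-- def droppedRequests__my_solution(requestTime):
--     """
--     count dropped requests as per rules:
--     - no more than 3 reqs/sec
--     - no more than 20 reqs/10sec
--     - no more than 60 reqs/60sec
--     ...NOTE: dropped requests count towards above quotas
--     https://leetcode.com/discuss/interview-question/819577/Throttling-Gateway-Hackerrank
--     """
--     import collections
--     sec_counts = collections.OrderedDict({i: requestTime.count(i) for i in requestTime})
--     all_dropped = 0
--     for sec in range(0, max(sec_counts.keys())+1):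
--         if sec in sec_counts:
--             # deal with 1 sec
--             count_1s = sec_counts[sec]
--             delta_1s = count_1s - 3
--             if delta_1s > 0:
--                 all_dropped += delta_1s
--
--             # deal with 10 secs
--             all_in_10s = count_1s - max(delta_1s, 0)
--             for j in range(max(sec-9, 0), sec):
--                 if j in sec_counts:
--                     all_in_10s += sec_counts[j]
--             delta_10s = all_in_10s - 20
--             if delta_10s > 0:
--                 all_dropped += delta_10s
--
--             # deal with 60 secs
--             all_in_60s = count_1s - max(delta_10s, 0)
--             for j in range(max(sec-59, 0), sec):
--                 if j in sec_counts:
--                     all_in_60s += sec_counts[j]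
--             delta_60s = all_in_60s - 60
--             if delta_60s > 0:
--                 all_dropped += delta_60s
--     return all_dropped
-- ===== SOURCE B (Python) =====
-- def droppedRequests__my_solution(requestTime):
--     from collections import Counter
--     from bisect import bisect_left
--     counts = Counter(t for t in requestTime if t >= 0)
--     secs = sorted(counts)
--     prefix = [0]
--     for s in secs:
--         prefix.append(prefix[-1] + counts[s])
--     dropped = 0
--     for i, s in enumerate(secs):
--         c = counts[s]
--         d1 = max(c - 3, 0)
--         w10 = prefix[i] - prefix[bisect_left(secs, s - 9)]
--         d10 = max(c - d1 + w10 - 20, 0)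
--         w60 = prefix[i] - prefix[bisect_left(secs, s - 59)]
--         d60 = max(c - d10 + w60 - 60, 0)
--         dropped += d1 + d10 + d60
--     return dropped
-- ===== Notes on version B (the rewrite author's own statement) =====
-- stated objective: faster
-- what changed: B replaces A's quadratic per-element list.count dict build and its scan over every integer second from 0 to max (with a 10s/60s re-scan window per second) by a Counter built in one pass, sorted distinct seconds, a prefix-sum array and bisect to read each 10s/60s window sum in O(log n), iterating only the seconds actually present.
import Mathlib
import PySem

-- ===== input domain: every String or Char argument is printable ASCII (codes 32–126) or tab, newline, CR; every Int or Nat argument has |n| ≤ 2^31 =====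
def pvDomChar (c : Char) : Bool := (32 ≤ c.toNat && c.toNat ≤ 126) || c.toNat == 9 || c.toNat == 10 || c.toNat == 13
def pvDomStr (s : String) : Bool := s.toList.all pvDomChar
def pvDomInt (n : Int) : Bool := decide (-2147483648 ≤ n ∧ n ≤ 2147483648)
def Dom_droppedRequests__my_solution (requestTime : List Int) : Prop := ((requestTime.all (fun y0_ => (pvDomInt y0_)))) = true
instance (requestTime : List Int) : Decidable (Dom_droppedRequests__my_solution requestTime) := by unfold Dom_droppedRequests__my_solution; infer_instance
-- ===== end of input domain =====

-- B: Counter + sorted distinct seconds + prefix sums + bisect windows instead of A's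
-- per-element list.count dict and scan over every integer second up to the maximum (objective: faster).


-- ===== PORT A =====
def droppedRequests__my_solution (requestTime : List Int) : Int :=
  let secCounts : PySem.Dict Int Int :=
    requestTime.foldl (fun d i => d.insert i ((PySem.List.count requestTime i : Nat) : Int)) PySem.Dict.empty
  match PySem.List.max? secCounts.keys (fun k => k) with
  | none => 0  -- Python raises ValueError here (max() of empty); excluded by Pre_
  | some mx =>
    (PySem.List.pyRange 0 (mx + 1) 1).foldl (fun allDropped sec =>
      if secCounts.contains sec then
        let count1s := secCounts.getD sec 0
        let delta1s := count1s - 3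
        let allDropped1 := if delta1s > 0 then allDropped + delta1s else allDropped
        let allIn10s := (PySem.List.pyRange (max (sec - 9) 0) sec 1).foldl
          (fun a j => if secCounts.contains j then a + secCounts.getD j 0 else a)
          (count1s - max delta1s 0)
        let delta10s := allIn10s - 20
        let allDropped2 := if delta10s > 0 then allDropped1 + delta10s else allDropped1
        let allIn60s := (PySem.List.pyRange (max (sec - 59) 0) sec 1).foldl
          (fun a j => if secCounts.contains j then a + secCounts.getD j 0 else a)
          (count1s - max delta10s 0)
        let delta60s := allIn60s - 60
        if delta60s > 0 then allDropped2 + delta60s else allDropped2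
      else allDropped) 0

-- ===== PORT B =====
def droppedRequests__my_solution_alt (requestTime : List Int) : Int :=
  let counts : PySem.Dict Int Int := PySem.Dict.counter (requestTime.filter (fun t => decide (0 ≤ t)))
  let secs : List Int := PySem.List.sorted counts.keys (fun k => k)
  let prefixSums : List Int :=
    secs.foldl (fun p s => p ++ [PySem.List.pyGetD p (-1) 0 + counts.getD s 0]) [(0 : Int)]
  (PySem.List.enumerate secs).foldl (fun dropped is =>
    let c := counts.getD is.2 0
    let d1 := max (c - 3) 0
    let w10 := PySem.List.pyGetD prefixSums is.1 0
               - PySem.List.pyGetD prefixSums ((PySem.List.bisectLeft secs (is.2 - 9) : Nat) : Int) 0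
    let d10 := max (c - d1 + w10 - 20) 0
    let w60 := PySem.List.pyGetD prefixSums is.1 0
               - PySem.List.pyGetD prefixSums ((PySem.List.bisectLeft secs (is.2 - 59) : Nat) : Int) 0
    let d60 := max (c - d10 + w60 - 60) 0
    dropped + d1 + d10 + d60) 0

-- ===== PRECONDITION & SPEC =====
-- Pre_ excludes only the empty list, on which Python's max() raises ValueError.
def Pre_droppedRequests__my_solution (requestTime : List Int) : Prop := requestTime ≠ []
instance (requestTime : List Int) : Decidable (Pre_droppedRequests__my_solution requestTime) := by
  unfold Pre_droppedRequests__my_solution; infer_instance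
def pvWitness_droppedRequests__my_solution : List Int := [0, 0, 0, 0, 5]

def Spec_droppedRequests__my_solution (requestTime : List Int) (out : Int) : Prop :=
  out = droppedRequests__my_solution_alt requestTime
instance (requestTime : List Int) (out : Int) : Decidable (Spec_droppedRequests__my_solution requestTime out) := by
  unfold Spec_droppedRequests__my_solution; infer_instance

-- ===== CLAIM (what is proved, stated in full; the proofs are below) =====
def Claim_equal_droppedRequests__my_solution : Prop := ∀ (requestTime : List Int), Dom_droppedRequests__my_solution requestTime → Pre_droppedRequests__my_solution requestTime → Spec_droppedRequests__my_solution requestTime (droppedRequests__my_solution requestTime)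

-- ===== LEMMAS AND PROOFS =====

def pvSecs (rt : List Int) : List Int :=
  PySem.List.sorted (PySem.Set.ofList (rt.filter (fun t => decide (0 ≤ t)))) (fun k => k)

def pvWin (secs : List Int) (f : Int → Int) (a b : Int) : Int :=
  ((secs.filter (fun j => decide (a ≤ j) && decide (j < b))).map f).sum

def pvP (secs : List Int) (f : Int → Int) (x : Int) : Int :=
  ((secs.filter (fun j => decide (j < x))).map f).sum

def pvCount (rt : List Int) (j : Int) : Int := ((PySem.List.count rt j : Nat) : Int)

def pvStep (secs : List Int) (f : Int → Int) (s : Int) : Int :=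
  let c := f s
  let d1 := max (c - 3) 0
  let d10 := max (c - d1 + pvWin secs f (s - 9) s - 20) 0
  let d60 := max (c - d10 + pvWin secs f (s - 59) s - 60) 0
  d1 + d10 + d60

theorem pvSecs_pairwise (rt : List Int) : (pvSecs rt).Pairwise (· < ·) := by
  unfold pvSecs
  have h1 := PySem.List.sorted_pairwise (PySem.Set.ofList (rt.filter (fun t => decide (0 ≤ t)))) (fun k => k)
  have h2 : (PySem.List.sorted (PySem.Set.ofList (rt.filter (fun t => decide (0 ≤ t)))) (fun k => k)).Nodup :=
    (PySem.List.sorted_perm _ _ _).nodup_iff.mpr (PySem.Set.nodup_ofList _)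
  exact (h1.and h2).imp fun h => lt_of_le_of_ne h.1 h.2

theorem pvSecs_mem (rt : List Int) (j : Int) : j ∈ pvSecs rt ↔ 0 ≤ j ∧ j ∈ rt := by
  unfold pvSecs
  rw [(PySem.List.sorted_perm _ _ _).mem_iff, PySem.Set.mem_ofList, List.mem_filter]
  simp [and_comm]

theorem eq_of_pairwise_lt_mem (l1 l2 : List Int) (h1 : l1.Pairwise (· < ·)) (h2 : l2.Pairwise (· < ·))
    (hm : ∀ x, x ∈ l1 ↔ x ∈ l2) : l1 = l2 := by
  have n1 : l1.Nodup := h1.imp ne_of_lt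
  have n2 : l2.Nodup := h2.imp ne_of_lt
  have hp : l2.Perm l1 := (List.perm_ext_iff_of_nodup n2 n1).mpr (fun a => (hm a).symm)
  have e1 := PySem.List.sorted_eq_of_perm_of_pairwise_lt l1 l1 (fun k => k) (List.Perm.refl l1) h1
  have e2 := PySem.List.sorted_eq_of_perm_of_pairwise_lt l1 l2 (fun k => k) hp h2
  rw [← e1, e2]

theorem getD_foldl_insert_const (c : Int → Int) : ∀ (l : List Int) (d : PySem.Dict Int Int) (j : Int),
    (l.foldl (fun d i => d.insert i (c i)) d).getD j 0 = if j ∈ l then c j else d.getD j 0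
  | [], d, j => by simp
  | x :: t, d, j => by
    rw [List.foldl_cons, getD_foldl_insert_const c t (d.insert x (c x)) j, PySem.Dict.getD_insert]
    by_cases hjt : j ∈ t <;> by_cases hjx : j = x <;> simp [hjt, hjx]

theorem take_eq_filter_lt (l : List Int) (k : Nat) (hk : k ≤ l.length) (x : Int)
    (hlt : ∀ (t : Nat) (ht : t < l.length), t < k → l[t] < x)
    (hge : ∀ (t : Nat) (ht : t < l.length), k ≤ t → x ≤ l[t]) :
    l.filter (fun j => decide (j < x)) = l.take k := by
  conv_lhs => rw [← List.take_append_drop k l]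
  rw [List.filter_append]
  have e1 : (l.take k).filter (fun j => decide (j < x)) = l.take k := by
    rw [List.filter_eq_self]
    intro a ha
    obtain ⟨t, ht, rfl⟩ := List.getElem_of_mem ha
    have ht' : t < k ∧ t < l.length := by simpa [List.length_take] using ht
    rw [List.getElem_take]
    simpa using hlt t ht'.2 ht'.1
  have e2 : (l.drop k).filter (fun j => decide (j < x)) = [] := by
    rw [List.filter_eq_nil_iff]
    intro a ha
    obtain ⟨t, ht, rfl⟩ := List.getElem_of_mem ha
    have ht' : k + t < l.length := by simp [List.length_drop] at ht; omega
    rw [List.getElem_drop]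
    have := hge (k + t) ht' (by omega)
    simpa using not_lt.mpr this
  rw [e1, e2, List.append_nil]

theorem pvP_split (f : Int → Int) (x s : Int) (hxs : x ≤ s) : ∀ (l : List Int),
    pvP l f s = pvP l f x + pvWin l f x s
  | [] => by simp [pvP, pvWin]
  | j :: t => by
    have ih := pvP_split f x s hxs t
    simp only [pvP, pvWin, List.filter_cons] at *
    by_cases h1 : j < x <;> by_cases h2 : j < s <;> by_cases h3 : x ≤ j <;>
      simp [h1, h2, h3, ih] <;> omega

theorem enumerate_map_snd {α : Type} : ∀ (l : List α) (s : Int),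
    (PySem.List.enumerate l s).map Prod.snd = l
  | [], _ => rfl
  | x :: t, s => by
    simp [PySem.List.enumerate, enumerate_map_snd t (s + 1)]

theorem mem_enumerate {α : Type} : ∀ (l : List α) (s : Int) (p : Int × α),
    p ∈ PySem.List.enumerate l s → ∃ (k : Nat) (hk : k < l.length), p.1 = s + k ∧ l[k] = p.2
  | [], _, _, h => by simp [PySem.List.enumerate] at h
  | x :: t, s, p, h => by
    simp only [PySem.List.enumerate, List.mem_cons] at h
    rcases h with h | h
    · exact ⟨0, by simp, by simp [h]⟩
    · obtain ⟨k, hk, h1, h2⟩ := mem_enumerate t (s + 1) p h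
      exact ⟨k + 1, by simpa using hk, by omega, by simpa using h2⟩

theorem prefixFold_eq (g : Int → Int) : ∀ (l : List Int) (p0 : List Int) (a : Int) (hl : p0.getLast? = some a),
    l.foldl (fun p s => p ++ [PySem.List.pyGetD p (-1) 0 + g s]) p0
      = p0 ++ (List.range l.length).map (fun k => a + ((l.take (k + 1)).map g).sum)
  | [], p0, a, _hl => by simp
  | s :: t, p0, a, hl => by
    have hne : p0 ≠ [] := by rintro rfl; simp at hl
    have hlast : PySem.List.pyGetD p0 (-1) 0 = a := by
      rw [PySem.List.pyGetD_neg_one p0 0 hne, List.getLast_eq_iff_getLast?_eq_some]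
      exact hl
    rw [List.foldl_cons, hlast,
      prefixFold_eq g t (p0 ++ [a + g s]) (a + g s) (by simp)]
    rw [List.length_cons, List.range_succ_eq_map]
    simp only [List.map_cons, List.map_map, List.append_assoc, List.singleton_append]
    congr 2
    · simp
    · apply List.map_congr_left
      intro k _
      simp only [Function.comp_apply, Nat.succ_eq_add_one, List.take_succ_cons, List.map_cons,
        List.sum_cons]
      ring

theorem prefix_getD (g : Int → Int) (l : List Int) (k : Nat) (hk : k ≤ l.length) :
    PySem.List.pyGetD (l.foldl (fun p s => p ++ [PySem.List.pyGetD p (-1) 0 + g s]) [(0 : Int)]) (k : Int) 0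
      = ((l.take k).map g).sum := by
  rw [prefixFold_eq g l [0] 0 rfl, PySem.List.pyGetD_natCast]
  cases k with
  | zero => simp
  | succ m =>
    have hm : m < l.length := by omega
    rw [List.singleton_append, List.getD_cons_succ]
    simp [List.getD_eq_getElem?_getD, hm]

theorem pvWin_congr (secs : List Int) (f g : Int → Int) (h : ∀ j ∈ secs, f j = g j) (a b : Int) :
    pvWin secs f a b = pvWin secs g a b := by
  unfold pvWin
  congr 1
  exact List.map_congr_left fun j hj => h j (List.mem_of_mem_filter hj)

theorem pvStep_congr (secs : List Int) (f g : Int → Int) (h : ∀ j ∈ secs, f j = g j) (s : Int)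
    (hs : s ∈ secs) : pvStep secs f s = pvStep secs g s := by
  unfold pvStep
  rw [h s hs, pvWin_congr secs f g h (s - 9) s, pvWin_congr secs f g h (s - 59) s]

-- the prefix-sum difference read off by bisect is the window sum

theorem prefix_window (secs : List Int) (g : Int → Int) (hpw : secs.Pairwise (· < ·))
    (k : Nat) (hk : k < secs.length) (w : Int) (hw : w ≤ secs[k]) :
    PySem.List.pyGetD (secs.foldl (fun p s => p ++ [PySem.List.pyGetD p (-1) 0 + g s]) [(0 : Int)]) (k : Int) 0
      - PySem.List.pyGetD (secs.foldl (fun p s => p ++ [PySem.List.pyGetD p (-1) 0 + g s]) [(0 : Int)])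
          ((PySem.List.bisectLeft secs (w) : Nat) : Int) 0
      = pvWin secs g w secs[k] := by
  have hle : secs.Pairwise (· ≤ ·) := hpw.imp le_of_lt
  obtain ⟨hlen, hlt, hge⟩ := PySem.List.bisectLeft_spec secs w hle
  have hmono := List.pairwise_iff_getElem.mp hpw
  rw [prefix_getD g secs k (le_of_lt hk), prefix_getD g secs _ hlen]
  have e1 : secs.take k = secs.filter (fun j => decide (j < secs[k])) := by
    rw [take_eq_filter_lt secs k (le_of_lt hk) secs[k]
      (fun t ht htk => hmono t k ht hk htk)
      (fun t ht hkt => by rcases Nat.eq_or_lt_of_le hkt with rfl | h; · rfl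
                          · exact le_of_lt (hmono k t hk ht h))]
  have e2 : secs.take (PySem.List.bisectLeft secs w) = secs.filter (fun j => decide (j < w)) := by
    rw [take_eq_filter_lt secs _ hlen w (fun t ht h => hlt t ht h) (fun t ht h => hge t ht h)]
  rw [e1, e2]
  have := pvP_split g w secs[k] hw secs
  unfold pvP at this
  omega

theorem b_side_pre (rt : List Int) :
    droppedRequests__my_solution_alt rt = ((pvSecs rt).map (pvStep (pvSecs rt) (pvCount rt))).sum := by
  unfold droppedRequests__my_solution_alt
  dsimp only
  rw [PySem.Dict.keys_counter]
  set counts := PySem.Dict.counter (rt.filter (fun t => decide (0 ≤ t))) with hcounts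
  set secs := PySem.List.sorted (PySem.Set.ofList (rt.filter (fun t => decide (0 ≤ t)))) (fun k => k) with hsecs
  have hsp : secs = pvSecs rt := rfl
  have hpw : secs.Pairwise (· < ·) := hsp ▸ pvSecs_pairwise rt
  refine (PySem.List.foldl_congr_mem _ _
    (fun dropped (is : Int × Int) => dropped + pvStep secs (fun s => counts.getD s 0) is.2) _ ?_).trans ?_
  · intro acc p hp
    obtain ⟨k, hk, h1, h2⟩ := mem_enumerate secs 0 p hp
    have h1' : p.1 = (k : Int) := by omega
    dsimp only
    rw [h1', ← h2]
    rw [prefix_window secs (fun s => counts.getD s 0) hpw k hk (secs[k] - 9) (by omega),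
        prefix_window secs (fun s => counts.getD s 0) hpw k hk (secs[k] - 59) (by omega)]
    dsimp only [pvStep]
    ring
  · rw [← List.foldl_map (f := Prod.snd)
        (g := fun acc s => acc + pvStep secs (fun s => counts.getD s 0) s),
      enumerate_map_snd secs 0, PySem.List.foldl_add, zero_add, ← hsp]
    exact congrArg List.sum (List.map_congr_left fun s hs => pvStep_congr secs (fun s => counts.getD s 0) (pvCount rt)
      (fun j hj => by
        have hj' := (pvSecs_mem rt j).mp (hsp ▸ hj)
        have hcf : List.count j (List.filter (fun t => decide (0 ≤ t)) rt) = List.count j rt :=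
          List.count_filter (by simpa using hj'.1)
        show counts.getD j 0 = pvCount rt j
        simp [hcounts, PySem.Dict.getD_counter, pvCount, PySem.List.count, hcf]) s hs)

theorem a_side_pre (rt : List Int) :
    droppedRequests__my_solution rt = ((pvSecs rt).map (pvStep (pvSecs rt) (pvCount rt))).sum := by
  unfold droppedRequests__my_solution
  dsimp only
  set dA := rt.foldl (fun d i => d.insert i ((PySem.List.count rt i : Nat) : Int)) PySem.Dict.empty with hdA
  have hkeys : dA.keys = PySem.Set.ofList rt := by
    rw [hdA, PySem.Dict.keys_foldl_insert, PySem.Dict.keys_empty, PySem.Set.update_nil_left]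
  have hc : ∀ x, dA.contains x = true ↔ x ∈ rt := fun x => by
    rw [PySem.Dict.contains_iff_mem_keys, hkeys, PySem.Set.mem_ofList]
  have hget : ∀ j ∈ rt, dA.getD j 0 = pvCount rt j := fun j hj => by
    rw [hdA, getD_foldl_insert_const]; simp [hj, pvCount]
  rw [hkeys]
  cases hmax : PySem.List.max? (PySem.Set.ofList rt) (fun k => k) with
  | none =>
    rw [PySem.List.max?_eq_none_iff] at hmax
    have hrt : rt = [] := by
      cases h : rt with
      | nil => rfl
      | cons x t =>
        exfalso
        have : x ∈ PySem.Set.ofList rt := (PySem.Set.mem_ofList rt x).mpr (by simp [h])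
        rw [hmax] at this
        simp at this
    subst hrt
    rfl
  | some mx =>
    dsimp only
    have hmx : ∀ y ∈ rt, y ≤ mx := fun y hy =>
      PySem.List.max?_isMax hmax y ((PySem.Set.mem_ofList rt y).mpr hy)
    rw [PySem.List.foldl_if_eq_foldl_filter (p := fun sec => dA.contains sec)]
    have hL : (PySem.List.pyRange 0 (mx + 1) 1).filter (fun sec => dA.contains sec) = pvSecs rt := by
      apply eq_of_pairwise_lt_mem
      · exact (PySem.List.pairwise_lt_pyRange_one 0 (mx + 1)).filter _
      · exact pvSecs_pairwise rt
      · intro x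
        rw [List.mem_filter, PySem.List.mem_pyRange_one, pvSecs_mem]
        constructor
        · rintro ⟨⟨h0, _⟩, h2⟩; exact ⟨h0, (hc x).mp h2⟩
        · rintro ⟨h0, h1⟩; exact ⟨⟨h0, by have := hmx x h1; omega⟩, (hc x).mpr h1⟩
    rw [hL]
    have hW : ∀ (s w : Int), s ∈ pvSecs rt →
        (PySem.List.pyRange (max (s - w) 0) s 1).filter (fun j => dA.contains j)
          = (pvSecs rt).filter (fun j => decide (s - w ≤ j) && decide (j < s)) := by
      intro s w hs
      apply eq_of_pairwise_lt_mem
      · exact (PySem.List.pairwise_lt_pyRange_one _ _).filter _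
      · exact (pvSecs_pairwise rt).filter _
      · intro x
        rw [List.mem_filter, List.mem_filter, PySem.List.mem_pyRange_one, pvSecs_mem]
        constructor
        · rintro ⟨⟨h0, h1⟩, h2⟩
          exact ⟨⟨by omega, (hc x).mp h2⟩, by simp; omega⟩
        · rintro ⟨⟨h0, h1⟩, h2⟩
          simp at h2
          exact ⟨⟨by omega, by omega⟩, (hc x).mpr h1⟩
    refine (PySem.List.foldl_congr_mem _ _ (fun acc s => acc + pvStep (pvSecs rt) (pvCount rt) s) _ ?_).trans ?_
    · intro acc s hs
      dsimp only
      have hs' := (pvSecs_mem rt s).mp hs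
      rw [PySem.List.foldl_if_eq_foldl_filter (p := fun j => dA.contains j)
            (f := fun a j => a + dA.getD j 0),
          PySem.List.foldl_if_eq_foldl_filter (p := fun j => dA.contains j)
            (f := fun a j => a + dA.getD j 0),
          hW s 9 hs, hW s 59 hs, PySem.List.foldl_add, PySem.List.foldl_add]
      have hmap : ∀ (a b : Int),
          (((pvSecs rt).filter (fun j => decide (a ≤ j) && decide (j < b))).map (fun j => dA.getD j 0))
            = (((pvSecs rt).filter (fun j => decide (a ≤ j) && decide (j < b))).map (pvCount rt)) := by
        intro a b
        exact List.map_congr_left fun j hj =>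
          hget j ((pvSecs_mem rt j).mp (List.mem_of_mem_filter hj)).2
      rw [hmap, hmap, hget s hs'.2]
      dsimp only [pvStep, pvWin]
      split_ifs <;> omega
    · rw [PySem.List.foldl_add, zero_add]

-- ===== VERDICT (by name: the statement is the Claim_ definition above) =====
theorem droppedRequests__my_solution_spec : Claim_equal_droppedRequests__my_solution := by
  intro rt _ _
  unfold Spec_droppedRequests__my_solution
  rw [a_side_pre, b_side_pre]
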